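-- pv_equiv track=rewrite | github.com/jnfkdsn/compiler | tensor_cpu/ir/lowering.py | _compute_strides
-- ===== SOURCE A (Python) =====
-- def _compute_strides(dims: tuple[str, ...]) -> tuple[str, ...]:
--     if not dims:
--         return ()
--     strides = ["1"] * len(dims)
--     for i in range(len(dims) - 2, -1, -1):
--         if strides[i + 1] == "1":
--             strides[i] = dims[i + 1]
--         else:
--             strides[i] = f"({strides[i + 1]} * {dims[i + 1]})"
--     return tuple(strides)
-- ===== SOURCE B (Python) =====
-- def _compute_strides(dims: tuple[str, ...]) -> tuple[str, ...]:
--     # Each stride is recomputed independently from the trailing dims,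
--     # instead of carrying one accumulator backwards as A does.
--     out = []
--     for i in range(len(dims)):
--         expr = "1"
--         for d in reversed(dims[i + 1:]):
--             expr = d if expr == "1" else f"({expr} * {d})"
--         out.append(expr)
--     return tuple(out)
-- ===== Notes on version B (the rewrite author's own statement) =====
-- stated objective: alternative
-- what changed: Replaces A's single backward pass that mutates a shared strides array with a per-position independent recomputation: for each index i, fold over the reversed suffix dims[i+1:] to build its stride expression from scratch.
import Mathlib
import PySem

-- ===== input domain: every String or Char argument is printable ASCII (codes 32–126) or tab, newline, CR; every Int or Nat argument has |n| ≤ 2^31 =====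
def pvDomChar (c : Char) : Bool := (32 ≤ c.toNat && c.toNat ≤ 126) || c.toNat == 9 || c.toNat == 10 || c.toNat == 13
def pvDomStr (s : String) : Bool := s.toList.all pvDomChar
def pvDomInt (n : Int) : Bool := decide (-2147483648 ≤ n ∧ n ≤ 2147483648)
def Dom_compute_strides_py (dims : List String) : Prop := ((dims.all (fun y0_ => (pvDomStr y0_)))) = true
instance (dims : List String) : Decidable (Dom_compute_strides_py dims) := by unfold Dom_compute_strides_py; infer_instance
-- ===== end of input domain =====

-- B replaces A's backward accumulator pass over a mutable array with an independent
-- per-position fold over each reversed suffix (alternative decomposition, not faster).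

-- ===== PORT A =====
-- one iteration of A's backward loop body (i always satisfies 0 ≤ i < len-1, so pyGetD/pySetD are exact)
def pvStepA (dims : List String) (strides : List String) (i : Int) : List String :=
  let prev := PySem.List.pyGetD strides (i + 1) ""
  let d := PySem.List.pyGetD dims (i + 1) ""
  if prev == "1" then PySem.List.pySetD strides i d
  else PySem.List.pySetD strides i ("(" ++ prev ++ " * " ++ d ++ ")")

def compute_strides_py (dims : List String) : List String :=
  if dims = [] then []
  else
    (PySem.List.pyRange ((dims.length : Int) - 2) (-1) (-1)).foldl (pvStepA dims)
      (List.replicate dims.length "1")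

-- ===== PORT B =====
-- B's inner loop: fold over the reversed suffix, seeded with "1"
def pvStride (suffix : List String) : String :=
  suffix.reverse.foldl
    (fun e d => if e == "1" then d else "(" ++ e ++ " * " ++ d ++ ")") "1"

def compute_strides_py_alt (dims : List String) : List String :=
  (List.range dims.length).map
    (fun i => pvStride (PySem.List.slice dims (some ((i + 1 : Nat) : Int)) none))

-- ===== PRECONDITION & SPEC =====
def Spec_compute_strides_py (dims : List String) (out : List String) : Prop := out = compute_strides_py_alt dims
instance (dims : List String) (out : List String) : Decidable (Spec_compute_strides_py dims out) := by unfold Spec_compute_strides_py; infer_instance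

-- ===== CLAIM (what is proved, stated in full; the proofs are below) =====
def Claim_equal_compute_strides_py : Prop := ∀ (dims : List String), Dom_compute_strides_py dims → Spec_compute_strides_py dims (compute_strides_py dims)

-- ===== LEMMAS AND PROOFS =====

-- the invariant state: positions < j still hold "1", positions ≥ j hold their final stride
def pvSt (dims : List String) (j : Nat) : List String :=
  (List.replicate j "1") ++
    (List.range (dims.length - j)).map (fun t => pvStride (dims.drop (j + t + 1)))

theorem pvStride_cons (x : String) (xs : List String) :
    pvStride (x :: xs) =
      (if pvStride xs == "1" then x else "(" ++ pvStride xs ++ " * " ++ x ++ ")") := by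
  simp [pvStride, List.foldl_append]

theorem pvSt_full (dims : List String) (h : dims ≠ []) :
    pvSt dims (dims.length - 1) = List.replicate dims.length "1" := by
  have hn : 0 < dims.length := List.length_pos_iff.mpr h
  have h1 : dims.length - (dims.length - 1) = 1 := by omega
  have h2 : dims.length - 1 + 0 + 1 = dims.length := by omega
  have : List.replicate dims.length "1"
      = List.replicate (dims.length - 1) "1" ++ ["1"] := by
    rw [← List.replicate_succ']
    congr 1
    omega
  simp [pvSt, h1, h2, this, pvStride]

theorem pvStepA_st (dims : List String) (j : Nat) (h1 : 1 ≤ j) (h2 : j ≤ dims.length - 1) :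
    pvStepA dims (pvSt dims j) ((j : Int) - 1) = pvSt dims (j - 1) := by
  have hn : 1 ≤ dims.length := by omega
  have hij : ((j : Int) - 1) + 1 = (j : Int) := by ring
  have hjlen : j < dims.length := by omega
  -- the value read at position j is the already-final stride for suffix starting at j+1
  have hget : PySem.List.pyGetD (pvSt dims j) (j : Int) "" = pvStride (dims.drop (j + 1)) := by
    rw [PySem.List.pyGetD_natCast]
    have hlen : (List.replicate j "1" : List String).length = j := by simp
    have hnz : 0 < dims.length - j := by omega
    rw [pvSt, List.getD_eq_getElem?_getD, List.getElem?_append_right (by simp)]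
    simp [hnz]
  have hdimget : PySem.List.pyGetD dims (j : Int) "" = dims[j] := by
    rw [PySem.List.pyGetD_natCast]
    simp [List.getD_eq_getElem?_getD, List.getElem?_eq_getElem hjlen]
  have hdrop : dims.drop j = dims[j] :: dims.drop (j + 1) := by
    exact (List.drop_eq_getElem_cons hjlen)
  -- the written value is the final stride for suffix starting at j
  have hval : pvStride (dims.drop j)
      = (if pvStride (dims.drop (j + 1)) == "1" then dims[j]
         else "(" ++ pvStride (dims.drop (j + 1)) ++ " * " ++ dims[j] ++ ")") := by
    rw [hdrop, pvStride_cons]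
  -- the state after the write
  have hset : ∀ v : String,
      PySem.List.pySetD (pvSt dims j) ((j : Int) - 1) v
        = List.replicate (j - 1) "1" ++ v ::
            (List.range (dims.length - j)).map (fun t => pvStride (dims.drop (j + t + 1))) := by
    intro v
    have h0 : (0 : Int) ≤ (j : Int) - 1 := by omega
    rw [PySem.List.pySetD_of_nonneg _ _ h0]
    have htn : ((j : Int) - 1).toNat = j - 1 := by omega
    rw [htn, pvSt]
    have hrep : (List.replicate j "1" : List String)
        = List.replicate (j - 1) "1" ++ ["1"] := by
      rw [← List.replicate_succ']; congr 1; omega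
    rw [hrep, List.append_assoc,
      List.set_append_right _ _ (by simp)]
    simp
  -- target state
  have htarget : pvSt dims (j - 1)
      = List.replicate (j - 1) "1" ++ pvStride (dims.drop j) ::
          (List.range (dims.length - j)).map (fun t => pvStride (dims.drop (j + t + 1))) := by
    rw [pvSt]
    have hr : dims.length - (j - 1) = (dims.length - j) + 1 := by omega
    rw [hr, List.range_succ_eq_map, List.map_cons, List.map_map]
    have he : j - 1 + 0 + 1 = j := by omega
    rw [he]
    have he3 : ((fun t => pvStride (List.drop (j - 1 + t + 1) dims)) ∘ Nat.succ)
        = (fun t => pvStride (List.drop (j + t + 1) dims)) := by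
      funext t
      simp only [Function.comp_apply]
      have he2 : j - 1 + Nat.succ t + 1 = j + t + 1 := by omega
      rw [he2]
    rw [he3]
  rw [pvStepA]
  simp only [hij, hget, hdimget]
  split
  · next hcond =>
      rw [hset, htarget, hval]
      rw [if_pos hcond]
  · next hcond =>
      rw [hset, htarget, hval]
      rw [if_neg hcond]

theorem pvFold_st (dims : List String) :
    ∀ (m : Nat), m ≤ dims.length - 1 →
      ((List.range m).map (fun k : Nat => ((dims.length : Int) - 2 - (k : Int)))).foldl (pvStepA dims)
          (pvSt dims (dims.length - 1))
        = pvSt dims (dims.length - 1 - m) := by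
  intro m
  induction m with
  | zero => intro _; simp
  | succ m ih =>
      intro hm
      rw [List.range_succ, List.map_append, List.foldl_append, ih (by omega)]
      simp only [List.map_cons, List.map_nil, List.foldl_cons, List.foldl_nil]
      have hj1 : 1 ≤ dims.length - 1 - m := by omega
      have hj2 : dims.length - 1 - m ≤ dims.length - 1 := by omega
      have hidx : ((dims.length : Int) - 2 - (m : Int)) = ((dims.length - 1 - m : Nat) : Int) - 1 := by
        omega
      have hfin : dims.length - 1 - m - 1 = dims.length - 1 - (m + 1) := by omega
      rw [hidx, pvStepA_st dims _ hj1 hj2, hfin]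

theorem compute_strides_eq (dims : List String) :
    compute_strides_py dims = compute_strides_py_alt dims := by
  by_cases h : dims = []
  · simp [compute_strides_py, compute_strides_py_alt, h]
  · have hn : 1 ≤ dims.length := by
      have := List.length_pos_iff.mpr h; omega
    rw [compute_strides_py, if_neg h]
    rw [PySem.List.pyRange_neg_one]
    have hcnt : (((dims.length : Int) - 2) - (-1)).toNat = dims.length - 1 := by omega
    rw [hcnt, ← pvSt_full dims h]
    rw [pvFold_st dims (dims.length - 1) (le_refl _)]
    have h0 : dims.length - 1 - (dims.length - 1) = 0 := by omega
    rw [h0, pvSt, compute_strides_py_alt]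
    simp only [Nat.sub_zero, List.replicate_zero, List.nil_append]
    apply List.map_congr_left
    intro i hi
    rw [PySem.List.slice_from_natCast]
    congr 2
    omega

-- ===== VERDICT (by name: the statement is the Claim_ definition above) =====
theorem compute_strides_py_spec : Claim_equal_compute_strides_py := by
  intro dims _
  unfold Spec_compute_strides_py
  exact compute_strides_eq dims
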